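-- pv_equiv track=rewrite | github.com/korvinca/tools | doc/code_snippets/codesignal/8_find_free_rooms_in_the_matrix.py | solution
-- ===== SOURCE A (Python) =====
-- def solution(matrix):
--     first_line = 1
--     f_cost = 0
--     hash = set()
--     for sub_array in matrix:
--         for i in range(0,len(sub_array)):
--             if first_line == 1:
--                 f_cost += sub_array[i]
--                 if sub_array[i] == 0 :
--                     hash.add(i)
--             else:
--                 if i in hash:
--                     continue
--                 else:
--                     f_cost += sub_array[i]
--                 if sub_array[i] == 0 :
--                     hash.add(i)
--
--         first_line = 0
--     return f_cost
-- ===== SOURCE B (Python) =====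
-- def solution(matrix):
--     total = 0
--     width = max((len(row) for row in matrix), default=0)
--     for j in range(width):
--         for row in matrix:
--             if len(row) > j:
--                 total += row[j]
--                 if row[j] == 0:
--                     break
--     return total
-- ===== Notes on version B (the rewrite author's own statement) =====
-- stated objective: alternative
-- what changed: Column-major traversal with an early break at the first zero of each column replaces A's row-major scan that maintains a set of dead columns.
import Mathlib
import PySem

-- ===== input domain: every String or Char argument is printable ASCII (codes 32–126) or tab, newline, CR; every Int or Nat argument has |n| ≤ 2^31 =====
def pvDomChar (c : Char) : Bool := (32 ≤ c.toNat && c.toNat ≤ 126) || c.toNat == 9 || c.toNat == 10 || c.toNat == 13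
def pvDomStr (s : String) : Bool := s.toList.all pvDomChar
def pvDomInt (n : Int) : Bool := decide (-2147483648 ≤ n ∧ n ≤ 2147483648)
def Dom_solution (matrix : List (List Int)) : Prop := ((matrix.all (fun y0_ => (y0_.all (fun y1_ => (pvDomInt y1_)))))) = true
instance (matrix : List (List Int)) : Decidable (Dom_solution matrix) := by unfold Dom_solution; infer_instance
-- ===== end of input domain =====

-- B replaces A's row-major scan + dead-column set by a column-major scan with an early break
-- at each column's first zero (objective: alternative, same cost).

-- ===== PORT A =====
-- state: (first_line, f_cost, hash); sub_array[i] with i from range(len) is always in range,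
-- so List.getD is exact there.
def solution (matrix : List (List Int)) : Int :=
  (matrix.foldl
    (fun (st : Nat × Int × PySem.Set Nat) subArray =>
      let res := (List.range subArray.length).foldl
        (fun (ac : Int × PySem.Set Nat) i =>
          if st.1 = 1 then
            (ac.1 + subArray.getD i 0,
             if subArray.getD i 0 = 0 then ac.2.add i else ac.2)
          else if ac.2.contains i then ac
          else
            (ac.1 + subArray.getD i 0,
             if subArray.getD i 0 = 0 then ac.2.add i else ac.2))
        (st.2.1, st.2.2)
      (0, res.1, res.2))
    (1, 0, PySem.Set.empty)).2.1

-- ===== PORT B =====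
-- inner 'for row in matrix: … break' loop of B, carrying the running total
def colLoop (rows : List (List Int)) (j : Nat) (total : Int) : Int :=
  match rows with
  | [] => total
  | row :: rest =>
    if j < row.length then
      let v := row.getD j 0
      if v = 0 then total + v else colLoop rest j (total + v)
    else colLoop rest j total

def solution_alt (matrix : List (List Int)) : Int :=
  let width := matrix.foldl (fun m row => max m row.length) 0
  (List.range width).foldl (fun total j => colLoop matrix j total) 0

-- ===== PRECONDITION & SPEC =====
def Spec_solution (matrix : List (List Int)) (out : Int) : Prop := out = solution_alt matrix
instance (matrix : List (List Int)) (out : Int) : Decidable (Spec_solution matrix out) := by unfold Spec_solution; infer_instance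

-- ===== CLAIM (what is proved, stated in full; the proofs are below) =====
def Claim_equal_solution : Prop := ∀ (matrix : List (List Int)), Dom_solution matrix → Spec_solution matrix (solution matrix)

-- ===== LEMMAS AND PROOFS =====

-- proof-only restatement of A's loops (definitionally equal to the lambdas in `solution`)
def rowStep (fl : Nat) (r : List Int) (ac : Int × PySem.Set Nat) (i : Nat) : Int × PySem.Set Nat :=
  if fl = 1 then (ac.1 + r.getD i 0, if r.getD i 0 = 0 then ac.2.add i else ac.2)
  else if ac.2.contains i then ac
  else (ac.1 + r.getD i 0, if r.getD i 0 = 0 then ac.2.add i else ac.2)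

def outerStep (st : Nat × Int × PySem.Set Nat) (subArray : List Int) : Nat × Int × PySem.Set Nat :=
  let res := (List.range subArray.length).foldl (rowStep st.1 subArray) (st.2.1, st.2.2)
  (0, res.1, res.2)

lemma solution_eq (m : List (List Int)) :
    solution m = (m.foldl outerStep (1, 0, PySem.Set.empty)).2.1 := rfl

def mySum (g : Nat → Int) : Nat → Int
  | 0 => 0
  | n + 1 => mySum g n + g n

lemma mySum_congr {g1 g2 : Nat → Int} : ∀ {n : Nat}, (∀ j, j < n → g1 j = g2 j) →
    mySum g1 n = mySum g2 n := by
  intro n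
  induction n with
  | zero => intro _; rfl
  | succ k ih =>
    intro h
    simp [mySum, ih (fun j hj => h j (Nat.lt_succ_of_lt hj)), h k (Nat.lt_succ_self k)]

lemma mySum_zero : ∀ n : Nat, mySum (fun _ => (0 : Int)) n = 0 := by
  intro n; induction n with
  | zero => rfl
  | succ k ih => simp [mySum, ih]

lemma mySum_add (g1 g2 : Nat → Int) : ∀ n : Nat,
    mySum (fun j => g1 j + g2 j) n = mySum g1 n + mySum g2 n := by
  intro n; induction n with
  | zero => rfl
  | succ k ih => simp [mySum, ih]; ring

lemma mySum_extend {g : Nat → Int} {n : Nat} : ∀ {w : Nat}, n ≤ w → (∀ j, n ≤ j → g j = 0) →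
    mySum g w = mySum g n := by
  intro w
  induction w with
  | zero => intro h _; simp [Nat.le_zero.mp h]
  | succ k ih =>
    intro h hz
    rcases Nat.lt_or_ge n (k + 1) with hlt | hge
    · have : n ≤ k := Nat.lt_succ_iff.mp hlt
      simp [mySum, ih this hz, hz k this]
    · have : n = k + 1 := Nat.le_antisymm h hge
      simp [this]

lemma colLoop_shift (rows : List (List Int)) (j : Nat) : ∀ t : Int,
    colLoop rows j t = t + colLoop rows j 0 := by
  induction rows with
  | nil => intro t; simp [colLoop]
  | cons row rest ih =>
    intro t
    simp only [colLoop]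
    split_ifs with h1 h2
    · ring
    · rw [ih (t + row.getD j 0), ih (0 + row.getD j 0)]; ring
    · rw [ih t]

lemma foldl_colLoop (m : List (List Int)) : ∀ (w : Nat) (c : Int),
    (List.range w).foldl (fun t j => colLoop m j t) c = c + mySum (fun j => colLoop m j 0) w := by
  intro w
  induction w with
  | zero => intro c; simp [mySum]
  | succ k ih =>
    intro c
    rw [List.range_succ, List.foldl_append]
    simp only [List.foldl_cons, List.foldl_nil, ih, mySum]
    rw [colLoop_shift]; ring

lemma contains_add_eq (s : PySem.Set Nat) (x y : Nat) :
    (PySem.Set.add s x).contains y = (s.contains y || decide (y = x)) := by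
  apply Bool.eq_iff_iff.mpr
  simp [PySem.Set.mem_add]

lemma contains_empty (i : Nat) : (PySem.Set.empty : PySem.Set Nat).contains i = false := rfl

lemma row_spec (fl : Nat) (r : List Int) (Hp : Nat → Bool)
    (hfl : fl = 1 → ∀ i, Hp i = false) :
    ∀ (n : Nat), n ≤ r.length → ∀ (c : Int) (hs : PySem.Set Nat), (∀ i, hs.contains i = Hp i) →
      ((List.range n).foldl (rowStep fl r) (c, hs)).1
          = c + mySum (fun i => if Hp i then 0 else r.getD i 0) n
        ∧ ∀ i, ((List.range n).foldl (rowStep fl r) (c, hs)).2.contains i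
          = (Hp i || (decide (i < n) && decide (r.getD i 0 = 0))) := by
  intro n
  induction n with
  | zero =>
    intro _ c hs hcs
    constructor
    · simp [mySum]
    · intro i
      simp only [List.range_zero, List.foldl_nil]
      rw [hcs i]; simp
  | succ k ih =>
    intro hk c hs hcs
    have hk' : k ≤ r.length := Nat.le_of_succ_le hk
    obtain ⟨ihc, ihh⟩ := ih hk' c hs hcs
    rw [List.range_succ, List.foldl_append]
    simp only [List.foldl_cons, List.foldl_nil]
    set st := (List.range k).foldl (rowStep fl r) (c, hs) with hst
    have hstep : rowStep fl r st k =
        if fl = 1 ∨ st.2.contains k = false then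
          (st.1 + r.getD k 0, if r.getD k 0 = 0 then st.2.add k else st.2)
        else st := by
      simp only [rowStep]
      by_cases h1 : fl = 1
      · simp [h1]
      · by_cases h2 : st.2.contains k
        · simp [h1]
        · simp [h1]
    have hHpk : (fl = 1 ∨ st.2.contains k = false) ↔ Hp k = false := by
      rw [ihh k]
      constructor
      · rintro (h | h)
        · exact hfl h k
        · simpa using h
      · intro h; right; simp [h]
    by_cases hH : Hp k
    · -- skipped step
      have : ¬ (fl = 1 ∨ st.2.contains k = false) := by
        rw [hHpk]; simp [hH]
      rw [hstep, if_neg this]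
      constructor
      · rw [ihc]; simp [mySum, hH]
      · intro i
        rw [ihh i]
        by_cases hi : i = k
        · subst hi; simp [hH]
        · have : (i < k + 1) ↔ (i < k) := by omega
          simp [this]
    · -- added step
      have hcond : (fl = 1 ∨ st.2.contains k = false) := hHpk.mpr (by simp [hH])
      rw [hstep, if_pos hcond]
      constructor
      · rw [ihc]; simp [mySum, hH, add_assoc]
      · intro i
        by_cases hz : r.getD k 0 = 0
        · rw [if_pos hz, contains_add_eq, ihh i]
          by_cases hi : i = k
          · subst hi; simp [hH]; exact hz
          · have h1 : (i < k + 1) ↔ (i < k) := by omega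
            simp [hi, h1]
        · rw [if_neg hz, ihh i]
          by_cases hi : i = k
          · subst hi; simp [hH]; exact hz
          · have h1 : (i < k + 1) ↔ (i < k) := by omega
            simp [h1]

lemma main_spec (w : Nat) :
    ∀ (P : List (List Int)) (fl : Nat) (c : Int) (hs : PySem.Set Nat) (Hp : Nat → Bool),
      (∀ i, hs.contains i = Hp i) → (fl = 1 → ∀ i, Hp i = false) →
      (∀ r ∈ P, r.length ≤ w) →
      (P.foldl outerStep (fl, c, hs)).2.1
        = c + mySum (fun j => if Hp j then 0 else colLoop P j 0) w := by
  intro P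
  induction P with
  | nil =>
    intro fl c hs Hp hcs hfl hlen
    have : mySum (fun j => if Hp j then (0:Int) else colLoop [] j 0) w = 0 := by
      rw [mySum_congr (g2 := fun _ => (0:Int)) (fun j _ => by simp [colLoop]), mySum_zero]
    simp [this]
  | cons r rest ih =>
    intro fl c hs Hp hcs hfl hlen
    simp only [List.foldl_cons]
    have hrow := row_spec fl r Hp hfl r.length (le_refl _) c hs hcs
    obtain ⟨hc1, hh1⟩ := hrow
    set res := (List.range r.length).foldl (rowStep fl r) (c, hs) with hres
    have houter : outerStep (fl, c, hs) r = (0, res.1, res.2) := rfl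
    rw [houter]
    set Hp' : Nat → Bool := fun i => Hp i || (decide (i < r.length) && decide (r.getD i 0 = 0)) with hHp'
    have := ih 0 res.1 res.2 Hp' hh1 (by intro h; omega) (fun s hs' => hlen s (List.mem_cons_of_mem _ hs'))
    rw [this, hc1]
    -- sum algebra
    have hGz : ∀ j, r.length ≤ j →
        (if Hp j then (0:Int) else (if j < r.length then r.getD j 0 else 0)) = 0 := by
      intro j hj
      have : ¬ j < r.length := by omega
      simp [this]
    have hext : mySum (fun i => if Hp i then (0:Int) else r.getD i 0) r.length
        = mySum (fun j => if Hp j then (0:Int) else (if j < r.length then r.getD j 0 else 0)) w := by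
      rw [mySum_extend (hlen r List.mem_cons_self) hGz]
      exact mySum_congr (fun j hj => by simp [hj])
    rw [hext, add_assoc, ← mySum_add]
    congr 1
    apply mySum_congr
    intro j hj
    by_cases hH : Hp j
    · simp [hH, Hp']
    · by_cases hjl : j < r.length
      · have hget : r.getD j 0 = r[j] := List.getD_eq_getElem r 0 hjl
        by_cases hz : r[j] = 0
        · simp [hH, Hp', hjl, hz, colLoop]
        · have h1 : colLoop (r :: rest) j 0 = colLoop rest j (0 + r[j]) := by
            simp [colLoop, hjl, hz]
          have hz2 : r[j]?.getD 0 ≠ 0 := by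
            rw [List.getElem?_eq_getElem hjl]; simpa using hz
          have h2 : Hp' j = false := by simp [Hp', hH, hz2]
          rw [h1, colLoop_shift rest j (0 + r[j])]
          simp [hH, hjl, h2]
      · simp [hH, Hp', hjl, colLoop]

lemma init_le_foldl_max : ∀ (l : List (List Int)) (a : Nat),
    a ≤ l.foldl (fun m row => max m row.length) a := by
  intro l
  induction l with
  | nil => intro a; simp
  | cons x xs ih =>
    intro a
    simp only [List.foldl_cons]
    exact le_trans (le_max_left a x.length) (ih (max a x.length))

lemma len_le_width (matrix : List (List Int)) :
    ∀ r ∈ matrix, r.length ≤ matrix.foldl (fun m row => max m row.length) 0 := by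
  suffices h : ∀ (l : List (List Int)) (a : Nat) (r : List Int), r ∈ l →
      r.length ≤ l.foldl (fun m row => max m row.length) a by
    intro r hr; exact h matrix 0 r hr
  intro l
  induction l with
  | nil => intro a r hr; cases hr
  | cons x xs ih =>
    intro a r hr
    rcases List.mem_cons.mp hr with h | h
    · subst h
      simp only [List.foldl_cons]
      exact le_trans (le_max_right a r.length) (init_le_foldl_max xs (max a r.length))
    · exact ih (max a x.length) r h

-- ===== VERDICT (by name: the statement is the Claim_ definition above) =====
theorem solution_spec : Claim_equal_solution := by
  intro matrix _
  unfold Spec_solution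
  rw [solution_eq]
  rw [main_spec (matrix.foldl (fun m row => max m row.length) 0) matrix 1 0 PySem.Set.empty
        (fun _ => false) (fun i => contains_empty i) (fun _ _ => rfl) (len_le_width matrix)]
  simp only [Bool.false_eq_true, if_false, zero_add]
  unfold solution_alt
  rw [foldl_colLoop]
  simp
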